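-- pv_equiv track=rewrite | github.com/ShaoxiongYuan/PycharmProjects | month1/1. Python核心/Day08/exercise02.py | square_matrix_transpose
-- ===== SOURCE A (Python) =====
-- def square_matrix_transpose(num):
--     """
--
--     :param num:
--     :return:
--     """
--     list1 = []
--     count = 0
--     for i in range(num):
--         list2 = []
--         for a in range(num):
--             count += 1
--             list2.append(count)
--         list1.append(list2)
--     for a in range(num - 1):
--         for b in range(a + 1, num):
--             list1[a][b], list1[b][a] = list1[b][a], list1[a][b]
--
--     return list1
-- ===== SOURCE B (Python) =====
-- def square_matrix_transpose(num):
--     # closed form: entry (a, b) of the transposed fill matrix is b*num + a + 1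
--     return [[b * num + a + 1 for b in range(num)] for a in range(num)]
-- ===== Notes on version B (the rewrite author's own statement) =====
-- stated objective: simpler
-- what changed: Replaces fill-then-in-place-triangular-swap (two phases with a running counter) by a single comprehension computing each entry directly from the closed form b*num+a+1.
import Mathlib
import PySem

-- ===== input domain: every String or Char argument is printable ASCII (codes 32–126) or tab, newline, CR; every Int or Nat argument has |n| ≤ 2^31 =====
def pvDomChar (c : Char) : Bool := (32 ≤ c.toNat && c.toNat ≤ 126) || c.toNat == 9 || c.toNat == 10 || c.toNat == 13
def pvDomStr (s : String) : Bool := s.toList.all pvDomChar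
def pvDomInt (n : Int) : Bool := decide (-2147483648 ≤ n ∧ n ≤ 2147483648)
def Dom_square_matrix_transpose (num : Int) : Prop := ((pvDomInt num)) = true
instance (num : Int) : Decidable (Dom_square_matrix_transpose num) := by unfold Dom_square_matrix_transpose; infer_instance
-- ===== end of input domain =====

-- B replaces A's fill-then-in-place-triangular-swap by one direct closed-form pass (simpler; same O(n^2) cost).

-- ===== PORT A =====
-- list1[i][j] read; indices come from range() so they are nonnegative and in range
-- (.toNat is exact here, and the default is never reached).
def pvGetNN (M : List (List Int)) (i j : Nat) : Int := (M.getD i []).getD j 0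

-- list1[i][j] = v  (in-range assignment; List.set is exact for the in-range indices Python uses)
def pvSetNN (M : List (List Int)) (i j : Nat) (v : Int) : List (List Int) :=
  M.set i ((M.getD i []).set j v)

def square_matrix_transpose (num : Int) : List (List Int) :=
  -- fill phase: list1 = [], count = 0; nested for loops appending count
  let fill := (PySem.List.pyRange 0 num 1).foldl
    (fun (st : List (List Int) × Int) _i =>
      let inner := (PySem.List.pyRange 0 num 1).foldl
        (fun (st2 : List Int × Int) _a => (st2.1 ++ [st2.2 + 1], st2.2 + 1))
        ([], st.2)
      (st.1 ++ [inner.1], inner.2))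
    ([], 0)
  -- swap phase: for a in range(num-1): for b in range(a+1, num): swap list1[a][b], list1[b][a]
  (PySem.List.pyRange 0 (num - 1) 1).foldl
    (fun M a =>
      (PySem.List.pyRange (a + 1) num 1).foldl
        (fun M2 b =>
          let x := pvGetNN M2 b.toNat a.toNat
          let y := pvGetNN M2 a.toNat b.toNat
          pvSetNN (pvSetNN M2 a.toNat b.toNat x) b.toNat a.toNat y)
        M)
    fill.1

-- ===== PORT B =====
def square_matrix_transpose_alt (num : Int) : List (List Int) :=
  (PySem.List.pyRange 0 num 1).map (fun a =>
    (PySem.List.pyRange 0 num 1).map (fun b => b * num + a + 1))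

-- ===== PRECONDITION & SPEC =====
def Spec_square_matrix_transpose (num : Int) (out : List (List Int)) : Prop := out = square_matrix_transpose_alt num
instance (num : Int) (out : List (List Int)) : Decidable (Spec_square_matrix_transpose num out) := by unfold Spec_square_matrix_transpose; infer_instance

-- ===== CLAIM (what is proved, stated in full; the proofs are below) =====
def Claim_equal_square_matrix_transpose : Prop := ∀ (num : Int), Dom_square_matrix_transpose num → Spec_square_matrix_transpose num (square_matrix_transpose num)

-- ===== LEMMAS AND PROOFS =====

-- shape predicate: an n×n matrix
def pvShape (M : List (List Int)) (n : Nat) : Prop :=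
  M.length = n ∧ ∀ r ∈ M, r.length = n

-- inner fill loop
theorem pv_fill_inner (L : List Int) (l2 : List Int) (c : Int) :
    L.foldl (fun (st2 : List Int × Int) _a => (st2.1 ++ [st2.2 + 1], st2.2 + 1)) (l2, c)
      = (l2 ++ (List.range L.length).map (fun j : Nat => c + (j : Int) + 1), c + L.length) := by
  induction L generalizing l2 c with
  | nil => simp
  | cons x L ih =>
    simp only [List.foldl_cons, ih, List.length_cons, List.range_succ_eq_map, List.map_cons,
      List.map_map]
    rw [Prod.mk.injEq]
    constructor
    · rw [List.append_assoc]
      congr 1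
      simp only [List.map_cons, List.map_map, List.cons_append, List.nil_append, List.cons.injEq]
      refine ⟨by push_cast; ring, List.map_congr_left fun j _ => ?_⟩
      simp only [Function.comp]
      push_cast
      ring
    · push_cast; ring

-- outer fill loop
theorem pv_fill_outer (L R : List Int) (l1 : List (List Int)) (c : Int) :
    L.foldl
      (fun (st : List (List Int) × Int) _i =>
        let inner := R.foldl (fun (st2 : List Int × Int) _a => (st2.1 ++ [st2.2 + 1], st2.2 + 1)) ([], st.2)
        (st.1 ++ [inner.1], inner.2)) (l1, c)
      = (l1 ++ (List.range L.length).map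
            (fun i : Nat => (List.range R.length).map
              (fun j : Nat => c + (i : Int) * R.length + (j : Int) + 1)),
         c + L.length * R.length) := by
  induction L generalizing l1 c with
  | nil => simp
  | cons x L ih =>
    simp only [List.foldl_cons, pv_fill_inner, List.nil_append] at ih ⊢
    rw [ih]
    simp only [List.length_cons, List.range_succ_eq_map]
    rw [Prod.mk.injEq]
    constructor
    · rw [List.append_assoc]
      congr 1
      simp only [List.map_cons, List.map_map, List.cons_append, List.nil_append, List.cons.injEq]
      constructor
      · exact List.map_congr_left fun j _ => by push_cast; ring
      · refine List.map_congr_left fun i _ => List.map_congr_left fun j _ => ?_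
        push_cast
        ring
    · push_cast; ring

-- getD after set, total form
theorem pv_getD_set {α : Type} (l : List α) (i p : Nat) (a d : α) :
    (l.set i a).getD p d = if p = i ∧ i < l.length then a else l.getD p d := by
  by_cases h1 : p = i
  · subst h1
    by_cases h2 : p < l.length
    · simp [List.getD_eq_getElem, List.length_set, h2]
    · rw [List.set_eq_of_length_le (le_of_not_gt h2)]
      simp [h2]
  · simp only [h1, false_and, if_false]
    rw [List.getD_eq_getElem?_getD, List.getD_eq_getElem?_getD, List.getElem?_set_ne (by omega)]

theorem pv_shape_set (M : List (List Int)) (n i j : Nat) (v : Int) (h : pvShape M n) :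
    pvShape (pvSetNN M i j v) n := by
  obtain ⟨hlen, hrow⟩ := h
  refine ⟨by simp [pvSetNN, hlen], fun r hr => ?_⟩
  rcases List.mem_or_eq_of_mem_set hr with h1 | h1
  · exact hrow r h1
  · subst h1
    rw [List.length_set]
    by_cases hi : i < M.length
    · rw [List.getD_eq_getElem M [] hi]
      exact hrow _ (List.getElem_mem hi)
    · -- i ≥ M.length: getD is [], the set is a no-op, so the row [] is in M
      have h0 : (M.getD i []) = [] := List.getD_eq_default M [] (le_of_not_gt hi)
      rw [h0]
      have hmem : ([] : List Int) ∈ M := by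
        unfold pvSetNN at hr
        rw [List.set_eq_of_length_le (le_of_not_gt hi), h0] at hr
        simpa using hr
      simpa using hrow _ hmem

theorem pv_get_set_eq (M : List (List Int)) (n i j : Nat) (v : Int)
    (h : pvShape M n) (hi : i < n) (hj : j < n) :
    pvGetNN (pvSetNN M i j v) i j = v := by
  obtain ⟨hlen, hrow⟩ := h
  have hi' : i < M.length := by omega
  have hL : (M.getD i []).length = n := by
    rw [List.getD_eq_getElem M [] hi']
    exact hrow _ (List.getElem_mem hi')
  unfold pvGetNN pvSetNN
  rw [pv_getD_set, if_pos ⟨rfl, hi'⟩, pv_getD_set, if_pos ⟨rfl, by omega⟩]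

theorem pv_get_set_ne (M : List (List Int)) (i j p q : Nat) (v : Int)
    (hne : p ≠ i ∨ q ≠ j) :
    pvGetNN (pvSetNN M i j v) p q = pvGetNN M p q := by
  unfold pvGetNN pvSetNN
  rw [pv_getD_set]
  by_cases hc : p = i ∧ i < M.length
  · obtain ⟨hpi, hil⟩ := hc
    rw [if_pos ⟨hpi, hil⟩, pv_getD_set, if_neg (by tauto), hpi]
  · rw [if_neg hc]

-- one swap step: swap entries (a,b) and (b,a)
def pvSwap (M : List (List Int)) (a b : Nat) : List (List Int) :=
  pvSetNN (pvSetNN M a b (pvGetNN M b a)) b a (pvGetNN M a b)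

theorem pv_swap_shape (M : List (List Int)) (n a b : Nat) (h : pvShape M n) :
    pvShape (pvSwap M a b) n := by
  exact pv_shape_set _ _ _ _ _ (pv_shape_set _ _ _ _ _ h)

theorem pv_swap_get (M : List (List Int)) (n a b p q : Nat)
    (h : pvShape M n) (ha : a < n) (hb : b < n) (hab : a ≠ b) :
    pvGetNN (pvSwap M a b) p q =
      if (p = a ∧ q = b) ∨ (p = b ∧ q = a) then pvGetNN M q p else pvGetNN M p q := by
  have hshape1 : pvShape (pvSetNN M a b (pvGetNN M b a)) n := pv_shape_set _ _ _ _ _ h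
  unfold pvSwap
  by_cases h1 : p = b ∧ q = a
  · obtain ⟨hp, hq⟩ := h1
    subst hp; subst hq
    rw [pv_get_set_eq _ n _ _ _ hshape1 hb ha, if_pos (Or.inr ⟨rfl, rfl⟩)]
  · rw [pv_get_set_ne _ _ _ _ _ _ (by tauto)]
    by_cases h2 : p = a ∧ q = b
    · obtain ⟨hp, hq⟩ := h2
      subst hp; subst hq
      rw [pv_get_set_eq _ n _ _ _ h ha hb, if_pos (Or.inl ⟨rfl, rfl⟩)]
    · rw [pv_get_set_ne _ _ _ _ _ _ (by tauto), if_neg (by tauto)]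

-- inner swap loop over a nodup list B of columns, all > a
theorem pv_inner_swap (B : List Nat) (M : List (List Int)) (n a : Nat)
    (h : pvShape M n) (ha : a < n) (hB : ∀ b ∈ B, a < b ∧ b < n) (hnd : B.Nodup) :
    pvShape (B.foldl (fun M2 b => pvSwap M2 a b) M) n ∧
    ∀ p q, pvGetNN (B.foldl (fun M2 b => pvSwap M2 a b) M) p q =
      if (p = a ∧ q ∈ B) ∨ (q = a ∧ p ∈ B) then pvGetNN M q p else pvGetNN M p q := by
  induction B generalizing M with
  | nil => simp [h]
  | cons b B' ih =>
    have hab : a < b := (hB b (List.mem_cons_self)).1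
    have hbn : b < n := (hB b (List.mem_cons_self)).2
    have hbB' : b ∉ B' := (List.nodup_cons.mp hnd).1
    have hB' : ∀ x ∈ B', a < x ∧ x < n := fun x hx => hB x (List.mem_cons_of_mem _ hx)
    have hM1 : pvShape (pvSwap M a b) n := pv_swap_shape M n a b h
    obtain ⟨ihS, ihG⟩ := ih (pvSwap M a b) hM1 hB' (List.nodup_cons.mp hnd).2
    refine ⟨by simpa [List.foldl_cons] using ihS, fun p q => ?_⟩
    rw [List.foldl_cons]
    rw [ihG p q]
    have hg : ∀ u v, pvGetNN (pvSwap M a b) u v =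
        if (u = a ∧ v = b) ∨ (u = b ∧ v = a) then pvGetNN M v u else pvGetNN M u v :=
      fun u v => pv_swap_get M n a b u v h ha hbn (by omega)
    by_cases hC : (p = a ∧ q ∈ B') ∨ (q = a ∧ p ∈ B')
    · rw [if_pos hC, hg]
      rcases hC with ⟨hp, hqB⟩ | ⟨hq, hpB⟩
      · have h1 : a < q := (hB' q hqB).1
        have h2 : q ≠ b := fun e => hbB' (e ▸ hqB)
        rw [if_neg (by rintro (⟨e1, _⟩ | ⟨e1, _⟩) <;> [omega; exact h2 e1])]
        rw [if_pos (Or.inl ⟨hp, List.mem_cons_of_mem _ hqB⟩)]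
      · have h1 : a < p := (hB' p hpB).1
        have h2 : p ≠ b := fun e => hbB' (e ▸ hpB)
        rw [if_neg (by rintro (⟨_, e2⟩ | ⟨_, e2⟩) <;> [exact h2 e2; omega])]
        rw [if_pos (Or.inr ⟨hq, List.mem_cons_of_mem _ hpB⟩)]
    · rw [if_neg hC, hg]
      by_cases hS : (p = a ∧ q = b) ∨ (p = b ∧ q = a)
      · rw [if_pos hS]
        rcases hS with ⟨hp, hq⟩ | ⟨hp, hq⟩
        · rw [if_pos (Or.inl ⟨hp, hq ▸ List.mem_cons_self⟩)]
        · rw [if_pos (Or.inr ⟨hq, hp ▸ List.mem_cons_self⟩)]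
      · rw [if_neg hS, if_neg ?_]
        simp only [List.mem_cons]
        tauto

-- outer swap loop
theorem pv_outer_swap (A : List Nat) (M : List (List Int)) (n : Nat)
    (h : pvShape M n) (hA : ∀ a ∈ A, a < n) (hnd : A.Nodup) :
    pvShape (A.foldl (fun M2 a =>
        ((List.range n).drop (a+1)).foldl (fun M3 b => pvSwap M3 a b) M2) M) n ∧
    ∀ p q, p < n → q < n →
      pvGetNN (A.foldl (fun M2 a =>
        ((List.range n).drop (a+1)).foldl (fun M3 b => pvSwap M3 a b) M2) M) p q =
      if min p q ∈ A ∧ p ≠ q then pvGetNN M q p else pvGetNN M p q := by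
  induction A generalizing M with
  | nil => simp [h]
  | cons a A' ih =>
    have han : a < n := hA a List.mem_cons_self
    have hmem : ∀ x, x ∈ (List.range n).drop (a + 1) ↔ a + 1 ≤ x ∧ x < n := by
      intro x
      rw [List.range_eq_range', List.drop_range']
      simp only [Nat.zero_add, Nat.mul_one]
      rw [List.mem_range'_1]
      omega
    have hnodB : ((List.range n).drop (a + 1)).Nodup :=
      List.Nodup.sublist (List.drop_sublist _ _) (List.nodup_range)
    obtain ⟨S1, G1⟩ := pv_inner_swap ((List.range n).drop (a + 1)) M n a h han
      (fun b hb => by have := (hmem b).mp hb; omega) hnodB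
    have hnotA' : a ∉ A' := (List.nodup_cons.mp hnd).1
    obtain ⟨S2, G2⟩ := ih _ S1 (fun x hx => hA x (List.mem_cons_of_mem _ hx))
      (List.nodup_cons.mp hnd).2
    refine ⟨by simpa [List.foldl_cons] using S2, fun p q hp hq => ?_⟩
    rw [List.foldl_cons, G2 p q hp hq]
    by_cases hC : min p q ∈ A' ∧ p ≠ q
    · rw [if_pos hC, G1]
      have hmin_ne_a : min p q ≠ a := fun e => hnotA' (e ▸ hC.1)
      rw [if_neg (by
        rintro (⟨e1, e2⟩ | ⟨e1, e2⟩) <;>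
          [ (have := (hmem p).mp e2; omega) ; (have := (hmem q).mp e2; omega) ])]
      exact (if_pos ⟨List.mem_cons_of_mem _ hC.1, hC.2⟩).symm
    · rw [if_neg hC, G1]
      by_cases hS : (p = a ∧ q ∈ (List.range n).drop (a + 1)) ∨
          (q = a ∧ p ∈ (List.range n).drop (a + 1))
      · rw [if_pos hS]
        rcases hS with ⟨e1, e2⟩ | ⟨e1, e2⟩
        · have h2 := (hmem q).mp e2
          have hm : min p q = a := by omega
          exact (if_pos ⟨hm ▸ List.mem_cons_self, by omega⟩).symm
        · have h2 := (hmem p).mp e2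
          have hm : min p q = a := by omega
          exact (if_pos ⟨hm ▸ List.mem_cons_self, by omega⟩).symm
      · rw [if_neg hS, if_neg ?_]
        rintro ⟨hm, hne⟩
        rcases List.mem_cons.mp hm with e | hA''
        · rcases Nat.lt_or_ge p q with hlt | hge
          · exact hS (Or.inl ⟨by omega, (hmem q).mpr (by omega)⟩)
          · exact hS (Or.inr ⟨by omega, (hmem p).mpr (by omega)⟩)
        · exact hC ⟨hA'', hne⟩

-- ===== VERDICT (by name: the statement is the Claim_ definition above) =====
-- matrices with the same shape and entries are equal
theorem pv_ext (M N : List (List Int)) (n : Nat) (hM : pvShape M n) (hN : pvShape N n)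
    (h : ∀ p q, p < n → q < n → pvGetNN M p q = pvGetNN N p q) : M = N := by
  obtain ⟨hMl, hMr⟩ := hM
  obtain ⟨hNl, hNr⟩ := hN
  apply List.ext_getElem (by omega)
  intro p hp hp'
  have hrowM : (M[p]).length = n := hMr _ (List.getElem_mem _)
  have hrowN : (N[p]'hp').length = n := hNr _ (List.getElem_mem _)
  apply List.ext_getElem (by omega)
  intro q hq hq'
  have hpq := h p q (by omega) (by omega)
  unfold pvGetNN at hpq
  rw [List.getD_eq_getElem M [] (by omega), List.getD_eq_getElem N [] (by omega),
      List.getD_eq_getElem _ 0 (by omega), List.getD_eq_getElem _ 0 (by omega)] at hpq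
  exact hpq

-- shape and entries of a matrix given as a map over List.range
theorem pv_map_shape (n : Nat) (f : Nat → Nat → Int) :
    pvShape ((List.range n).map (fun i => (List.range n).map (fun j => f i j))) n := by
  constructor
  · simp
  · intro r hr
    obtain ⟨i, _, rfl⟩ := List.mem_map.mp hr
    simp

theorem pv_map_get (n : Nat) (f : Nat → Nat → Int) (p q : Nat) (hp : p < n) (hq : q < n) :
    pvGetNN ((List.range n).map (fun i => (List.range n).map (fun j => f i j))) p q = f p q := by
  unfold pvGetNN
  rw [List.getD_eq_getElem _ [] (by simp [hp]), List.getElem_map, List.getElem_range,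
      List.getD_eq_getElem _ 0 (by simp [hq]), List.getElem_map, List.getElem_range]

-- the inner swap loop of port A, with its Int range indices converted to Nat
theorem pv_bridge_inner (num : Int) (k : Nat) (M : List (List Int)) :
    (PySem.List.pyRange ((0:Int) + (k:Int) + 1) num 1).foldl
      (fun M2 b => pvSetNN (pvSetNN M2 ((0:Int) + (k:Int)).toNat b.toNat
          (pvGetNN M2 b.toNat ((0:Int) + (k:Int)).toNat)) b.toNat ((0:Int) + (k:Int)).toNat
          (pvGetNN M2 ((0:Int) + (k:Int)).toNat b.toNat)) M
    = ((List.range num.toNat).drop (k + 1)).foldl (fun M3 b => pvSwap M3 k b) M := by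
  have hd : (List.range num.toNat).drop (k + 1)
      = (List.range (num.toNat - (k + 1))).map (fun j => (k + 1) + j) := by
    rw [List.range_eq_range', List.drop_range', List.range'_eq_map_range]
    simp
  rw [hd, List.foldl_map, PySem.List.pyRange_one, List.foldl_map]
  have he : (num - (0 + (k:Int) + 1)).toNat = num.toNat - (k + 1) := by omega
  rw [he]
  congr 1
  funext M2 j
  have e1 : ((0:Int) + (k:Int)).toNat = k := by omega
  have e2 : ((0:Int) + (k:Int) + 1 + (j:Int)).toNat = k + 1 + j := by omega
  simp only [e1, e2, pvSwap]

-- the whole swap phase of port A equals the Nat-indexed double fold of pv_outer_swap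
theorem pv_bridge (num : Int) (M0 : List (List Int)) :
    (PySem.List.pyRange 0 (num - 1) 1).foldl
      (fun M a => (PySem.List.pyRange (a + 1) num 1).foldl
        (fun M2 b => pvSetNN (pvSetNN M2 a.toNat b.toNat (pvGetNN M2 b.toNat a.toNat))
            b.toNat a.toNat (pvGetNN M2 a.toNat b.toNat)) M) M0
    = (List.range (num.toNat - 1)).foldl
        (fun M2 a => ((List.range num.toNat).drop (a + 1)).foldl
          (fun M3 b => pvSwap M3 a b) M2) M0 := by
  rw [PySem.List.pyRange_one, List.foldl_map]
  have he : (num - 1 - 0).toNat = num.toNat - 1 := by omega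
  rw [he]
  congr 1
  funext M2 k
  exact pv_bridge_inner num k M2

theorem square_matrix_transpose_spec : Claim_equal_square_matrix_transpose := by
  intro num _
  unfold Spec_square_matrix_transpose
  by_cases hpos : 0 < num
  case neg =>
    have h1 : PySem.List.pyRange 0 num 1 = [] := PySem.List.pyRange_one_eq_nil (by omega)
    have h2 : PySem.List.pyRange 0 (num - 1) 1 = [] := PySem.List.pyRange_one_eq_nil (by omega)
    simp [square_matrix_transpose, square_matrix_transpose_alt, h1, h2]
  case pos =>
    simp only [square_matrix_transpose, square_matrix_transpose_alt]
    rw [pv_fill_outer]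
    have hlen : (PySem.List.pyRange 0 num 1).length = num.toNat := by
      rw [PySem.List.length_pyRange_one]
      omega
    rw [hlen]
    simp only [List.nil_append]
    rw [pv_bridge]
    -- characterize the filled matrix and apply the swap-phase characterization
    have hM0shape := pv_map_shape num.toNat
      (fun i j => 0 + (i : Int) * (num.toNat : Int) + (j : Int) + 1)
    obtain ⟨hS, hG⟩ := pv_outer_swap (List.range (num.toNat - 1)) _ num.toNat hM0shape
      (fun a ha => by have := List.mem_range.mp ha; omega) (List.nodup_range)
    -- the right-hand side as a range map
    have hB : (PySem.List.pyRange 0 num 1).map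
        (fun a => (PySem.List.pyRange 0 num 1).map (fun b => b * num + a + 1))
      = (List.range num.toNat).map (fun p : Nat => (List.range num.toNat).map
          (fun q : Nat => (q : Int) * num + (p : Int) + 1)) := by
      rw [PySem.List.pyRange_one]
      have he : (num - 0).toNat = num.toNat := by omega
      rw [he, List.map_map]
      refine List.map_congr_left fun p _ => ?_
      simp only [Function.comp_apply, List.map_map]
      exact List.map_congr_left fun q _ => by
        simp only [Function.comp_apply]
        push_cast
        ring
    rw [hB]
    apply pv_ext _ _ num.toNat hS (pv_map_shape _ _)
    intro p q hp hq
    have hc : ((num.toNat : Int)) = num := by omega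
    have hBget : pvGetNN ((List.range num.toNat).map (fun i : Nat => (List.range num.toNat).map
        (fun j : Nat => (j : Int) * num + (i : Int) + 1))) p q = (q : Int) * num + (p : Int) + 1 :=
      pv_map_get num.toNat (fun i j => (j : Int) * num + (i : Int) + 1) p q hp hq
    rw [hG p q hp hq, hBget]
    by_cases hne : p = q
    · subst hne
      rw [if_neg (by tauto),
        pv_map_get num.toNat (fun i j => 0 + (i : Int) * (num.toNat : Int) + (j : Int) + 1) p p hp hp]
      rw [hc]
      ring
    · have hmem : min p q ∈ List.range (num.toNat - 1) := by
        rw [List.mem_range]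
        omega
      rw [if_pos ⟨hmem, hne⟩,
        pv_map_get num.toNat (fun i j => 0 + (i : Int) * (num.toNat : Int) + (j : Int) + 1) q p hq hp]
      rw [hc]
      ring
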